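-- pv_equiv track=rewrite | github.com/kyokagong/gyyChatBot | chatbot/src/python/dgk/dgk_util.py | get_batch_buckets_map
-- ===== SOURCE A (Python) =====
-- def get_batch_buckets_map(pair_data, buckets):
--     """
--         first constructing a map contain <bucket, list of pairs>
--         second, random pick a bucket, and train pairs in buckets_map[bucket] batch by batch
--
--         args: buckets must be order in asc
--     """
--     buckets_map = {}
--     for bucket in list(reversed(buckets)):
--         buckets_map[bucket] = []
--
--     for pair in pair_data:
--         for bucket in buckets:
--             if max([len(pair[0]),len(pair[1])]) <= min(bucket)-3:
--                 buckets_map[bucket].append(pair)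
--                 break
--     return buckets_map
-- ===== SOURCE B (Python) =====
-- def get_batch_buckets_map(pair_data, buckets):
--     """Bucketize pairs: each pair goes to the first bucket b with
--     max(len(pair[0]), len(pair[1])) <= min(b) - 3.
--     Faster: thresholds min(b)-3 are precomputed once, filtered to the strictly
--     increasing record prefix-maxima (only those can be a first fit), and each
--     pair is placed with one binary search instead of a linear scan that
--     recomputes min(b) per pair."""
--     buckets_map = {bucket: [] for bucket in reversed(buckets)}
--     records = []  # (threshold, bucket), thresholds strictly increasing
--     for bucket in buckets:
--         t = min(bucket) - 3
--         if not records or records[-1][0] < t: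
--             records.append((t, bucket))
--     thresholds = [t for t, _ in records]
--     n = len(records)
--     for pair in pair_data:
--         m = max(len(pair[0]), len(pair[1]))
--         lo, hi = 0, n
--         while lo < hi:  # bisect_left(thresholds, m)
--             mid = (lo + hi) // 2
--             if thresholds[mid] < m:
--                 lo = mid + 1
--             else:
--                 hi = mid
--         if lo < n:
--             buckets_map[records[lo][1]].append(pair)
--     return buckets_map
-- ===== Notes on version B (the rewrite author's own statement) =====
-- stated objective: faster
-- what changed: Instead of scanning all buckets per pair (recomputing min(bucket) every time), B precomputes the thresholds min(bucket)-3 once, keeps only the strictly increasing record prefix-maxima (the only possible first fits), and places each pair with one binary search over them.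
-- outside the precondition, e.g. on get_batch_buckets_map([], [()]): A returns {(): []}, B raises ValueError; on get_batch_buckets_map([([1], [1])], [(5,), ()]): A returns {(): [], (5,): [([1], [1])]}, B raises ValueError
import Mathlib
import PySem

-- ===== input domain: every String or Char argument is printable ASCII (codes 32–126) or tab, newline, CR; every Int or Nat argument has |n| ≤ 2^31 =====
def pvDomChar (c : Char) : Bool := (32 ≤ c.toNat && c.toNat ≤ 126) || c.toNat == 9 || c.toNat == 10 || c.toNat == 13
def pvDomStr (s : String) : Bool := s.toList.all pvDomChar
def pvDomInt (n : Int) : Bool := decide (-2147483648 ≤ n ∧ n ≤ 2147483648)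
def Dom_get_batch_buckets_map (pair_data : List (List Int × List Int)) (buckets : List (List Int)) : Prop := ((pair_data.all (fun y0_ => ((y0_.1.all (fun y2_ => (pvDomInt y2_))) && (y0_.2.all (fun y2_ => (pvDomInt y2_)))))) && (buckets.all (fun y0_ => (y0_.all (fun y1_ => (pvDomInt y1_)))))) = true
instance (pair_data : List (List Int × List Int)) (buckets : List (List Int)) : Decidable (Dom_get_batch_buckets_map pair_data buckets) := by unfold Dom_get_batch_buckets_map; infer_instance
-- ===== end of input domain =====

-- B replaces A's per-pair linear scan over buckets (which recomputes min(bucket) each time)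
-- by a precomputed strictly-increasing list of record thresholds min(bucket)-3 and one
-- binary search per pair; equivalence is proved on inputs whose buckets are all nonempty.

-- ===== PORT A =====
-- min(bucket) - 3; Python's min raises ValueError on an empty bucket — those inputs are
-- excluded by Pre_ below, the .getD 0 default is never relied upon inside Pre_.
def pyMinSub3 (b : List Int) : Int := ((PySem.List.min? b (fun x => x)).getD 0) - 3

-- inner 'for bucket in buckets: ... break' loop of A
def gbbmScan (p : List Int × List Int) (bs : List (List Int))
    (d : PySem.Dict (List Int) (List (List Int × List Int))) :
    PySem.Dict (List Int) (List (List Int × List Int)) :=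
  match bs with
  | [] => d
  | b :: rest =>
    if max (p.1.length : Int) (p.2.length : Int) ≤ pyMinSub3 b then
      d.modify b [] (fun l => l ++ [p])
    else gbbmScan p rest d

def get_batch_buckets_map (pair_data : List (List Int × List Int)) (buckets : List (List Int)) : List (List Int × List (List Int × List Int)) :=
  let d0 := buckets.reverse.foldl (fun d b => d.insert b []) PySem.Dict.empty
  (pair_data.foldl (fun d p => gbbmScan p buckets d) d0).items

-- ===== PORT B =====
-- records loop of B: keep (min(bucket)-3, bucket) only when the threshold is a new record
def gbbmRecStep (rs : List (Int × List Int)) (b : List Int) : List (Int × List Int) :=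
  let t := pyMinSub3 b
  match rs.getLast? with
  | none => rs ++ [(t, b)]
  | some last => if last.1 < t then rs ++ [(t, b)] else rs

def get_batch_buckets_map_alt (pair_data : List (List Int × List Int)) (buckets : List (List Int)) : List (List Int × List (List Int × List Int)) :=
  let d0 := buckets.reverse.foldl (fun d b => d.insert b []) PySem.Dict.empty
  let records := buckets.foldl gbbmRecStep []
  let thresholds := records.map (fun r => r.1)
  (pair_data.foldl (fun d p =>
      let m := max (p.1.length : Int) (p.2.length : Int)
      let lo := PySem.List.bisectLeft thresholds m   -- B's hand-written while-loop is bisect_left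
      match records[lo]? with
      | some r => d.modify r.2 [] (fun l => l ++ [p])
      | none => d) d0).items

-- ===== PRECONDITION & SPEC =====
-- Pre_ excludes inputs containing an empty bucket: min(()) raises ValueError there — in A as
-- soon as some pair's scan reaches that bucket (so A still returns when no pair does), in B
-- always while precomputing the thresholds.
def Pre_get_batch_buckets_map (pair_data : List (List Int × List Int)) (buckets : List (List Int)) : Prop :=
  ∀ b ∈ buckets, b ≠ []
instance (pair_data : List (List Int × List Int)) (buckets : List (List Int)) : Decidable (Pre_get_batch_buckets_map pair_data buckets) := by unfold Pre_get_batch_buckets_map; infer_instance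
def pvWitness_get_batch_buckets_map : (List (List Int × List Int)) × List (List Int) :=
  ([([1], [1, 2])], [[5], [9, 10]])
def Spec_get_batch_buckets_map (pair_data : List (List Int × List Int)) (buckets : List (List Int)) (out : List (List Int × List (List Int × List Int))) : Prop := out = get_batch_buckets_map_alt pair_data buckets
instance (pair_data : List (List Int × List Int)) (buckets : List (List Int)) (out : List (List Int × List (List Int × List Int))) : Decidable (Spec_get_batch_buckets_map pair_data buckets out) := by unfold Spec_get_batch_buckets_map; infer_instance

-- ===== CLAIM (what is proved, stated in full; the proofs are below) =====
def Claim_equal_get_batch_buckets_map : Prop := ∀ (pair_data : List (List Int × List Int)) (buckets : List (List Int)), Dom_get_batch_buckets_map pair_data buckets → Pre_get_batch_buckets_map pair_data buckets → Spec_get_batch_buckets_map pair_data buckets (get_batch_buckets_map pair_data buckets)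

-- ===== LEMMAS AND PROOFS =====

-- in a strictly increasing list, every element is ≤ the last one
theorem pvChain_le_getLast : ∀ (l : List Int) (a : Int), l.Pairwise (· < ·) →
    l.getLast? = some a → ∀ x ∈ l, x ≤ a := by
  intro l
  induction l with
  | nil => intro a _ h x hx; cases hx
  | cons y l ih =>
    intro a hp hl x hx
    cases l with
    | nil =>
      simp at hl hx
      omega
    | cons z l' =>
      have hl' : (z :: l').getLast? = some a := by
        rw [List.getLast?_cons_cons] at hl; exact hl
      rcases List.mem_cons.mp hx with rfl | hx'
      · have : a ∈ z :: l' := List.mem_of_getLast? hl'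
        have := (List.pairwise_cons.mp hp).1 a this
        omega
      · exact ih a (List.pairwise_cons.mp hp).2 hl' x hx'

-- scanning a list for the first i with all earlier entries failing the predicate
theorem pvFind_eq_getElem : ∀ (l : List (Int × List Int)) (p : (Int × List Int) → Bool) (i : Nat)
    (h : i < l.length), (∀ j (hj : j < l.length), j < i → p l[j] = false) → p l[i] = true →
    l.find? p = some l[i] := by
  intro l
  induction l with
  | nil => intro p i h; simp at h
  | cons y l ih =>
    intro p i h hlt htrue
    cases i with
    | zero => simpa [List.find?_cons_of_pos, htrue] using List.find?_cons_of_pos (l := l) htrue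
    | succ i =>
      have h0 : p y = false := hlt 0 (by omega) (by omega)
      rw [List.find?_cons_of_neg (by simp [h0])]
      exact ih p i (by simpa using h) (fun j hj hji => hlt (j+1) (by omega) (by omega)) htrue

theorem pvRecs_pairwise : ∀ (bs : List (List Int)) (acc : List (Int × List Int)),
    (acc.map (fun r => r.1)).Pairwise (· < ·) →
    ((bs.foldl gbbmRecStep acc).map (fun r => r.1)).Pairwise (· < ·) := by
  intro bs
  induction bs with
  | nil => intro acc h; simpa using h
  | cons b bs ih =>
    intro acc h
    simp only [List.foldl_cons]
    apply ih
    unfold gbbmRecStep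
    cases hl : acc.getLast? with
    | none =>
      have : acc = [] := List.getLast?_eq_none_iff.mp hl
      subst this; simp
    | some last =>
      by_cases hlt : last.1 < pyMinSub3 b
      · simp only [hlt, if_true]
        rw [List.map_append]
        rw [List.pairwise_append]
        refine ⟨h, by simp, ?_⟩
        intro x hx y hy
        simp at hy; subst hy
        have hx' : x ≤ last.1 := by
          apply pvChain_le_getLast _ _ h
          · rw [List.getLast?_map, hl]; rfl
          · exact hx
        omega
      · simpa [hlt] using h

theorem pvFoldRec_find (m : Int) : ∀ (bs : List (List Int)) (acc : List (Int × List Int)),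
    (acc.map (fun r => r.1)).Pairwise (· < ·) →
    (bs.foldl gbbmRecStep acc).find? (fun r => decide (m ≤ r.1)) =
      (acc.find? (fun r => decide (m ≤ r.1))).or
        ((bs.find? (fun b => decide (m ≤ pyMinSub3 b))).map (fun b => (pyMinSub3 b, b))) := by
  intro bs
  induction bs with
  | nil =>
    intro acc _; simp
  | cons b bs ih =>
    intro acc h
    simp only [List.foldl_cons]
    have hstep : (acc.map (fun r => r.1)).Pairwise (· < ·) →
        ((gbbmRecStep acc b).map (fun r => r.1)).Pairwise (· < ·) := by
      intro h'
      have := pvRecs_pairwise [b] acc h'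
      simpa using this
    rw [ih (gbbmRecStep acc b) (hstep h)]
    unfold gbbmRecStep
    cases hl : acc.getLast? with
    | none =>
      have : acc = [] := List.getLast?_eq_none_iff.mp hl
      subst this
      by_cases hm : m ≤ pyMinSub3 b
      · simp [List.find?_cons_of_pos, hm]
      · simp [List.find?_cons_of_neg, hm]
    | some last =>
      by_cases hlt : last.1 < pyMinSub3 b
      · simp only [hlt, if_true]
        rw [List.find?_append]
        by_cases hm : m ≤ pyMinSub3 b
        · cases hacc : acc.find? (fun r => decide (m ≤ r.1)) with
          | some r => simp [List.find?_cons_of_pos, hm]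
          | none => simp [List.find?_cons_of_pos, hm]
        · cases hacc : acc.find? (fun r => decide (m ≤ r.1)) with
          | some r => simp [List.find?_cons_of_neg, hm]
          | none => simp [List.find?_cons_of_neg, hm]
      · simp only [hlt, if_false]
        cases hacc : acc.find? (fun r => decide (m ≤ r.1)) with
        | some r => simp
        | none =>
          have hall : ∀ r ∈ acc, ¬ (m ≤ r.1) := by
            intro r hr
            have := List.find?_eq_none.mp hacc r hr
            simpa using this
          have hlast : ¬ (m ≤ pyMinSub3 b) := by
            have hmem : last ∈ acc := List.mem_of_getLast? hl
            have := hall last hmem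
            omega
          simp [List.find?_cons_of_neg, hlast]

theorem pvBisect_find (rs : List (Int × List Int)) (m : Int)
    (h : (rs.map (fun r => r.1)).Pairwise (· < ·)) :
    rs[PySem.List.bisectLeft (rs.map (fun r => r.1)) m]? =
      rs.find? (fun r => decide (m ≤ r.1)) := by
  have hle : (rs.map (fun r => r.1)).Pairwise (· ≤ ·) := h.imp (fun hab => le_of_lt hab)
  obtain ⟨hlen, hbelow, habove⟩ := PySem.List.bisectLeft_spec (rs.map (fun r => r.1)) m hle
  set i := PySem.List.bisectLeft (rs.map (fun r => r.1)) m with hi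
  rw [List.length_map] at hlen
  by_cases hilt : i < rs.length
  · rw [List.getElem?_eq_getElem hilt]
    symm
    apply pvFind_eq_getElem rs _ i hilt
    · intro j hj hji
      have := hbelow j (by simpa using hj) hji
      rw [List.getElem_map] at this
      simp only [decide_eq_false_iff_not]
      omega
    · have := habove i (by simpa using hilt) (le_refl i)
      rw [List.getElem_map] at this
      simpa using this
  · rw [List.getElem?_eq_none (by omega)]
    symm
    apply List.find?_eq_none.mpr
    intro r hr
    obtain ⟨j, hj, rfl⟩ := List.mem_iff_getElem.mp hr
    have := hbelow j (by simpa using hj) (by omega)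
    rw [List.getElem_map] at this
    simp only [decide_eq_true_eq]
    omega

theorem pvScan_eq_find (p : List Int × List Int)
    (d : PySem.Dict (List Int) (List (List Int × List Int))) : ∀ (bs : List (List Int)),
    gbbmScan p bs d =
      match bs.find? (fun b => decide (max (p.1.length : Int) (p.2.length : Int) ≤ pyMinSub3 b)) with
      | some b => d.modify b [] (fun l => l ++ [p])
      | none => d := by
  intro bs
  induction bs with
  | nil => rfl
  | cons b bs ih =>
    by_cases hm : max (p.1.length : Int) (p.2.length : Int) ≤ pyMinSub3 b
    · have hfind : List.find? (fun b => decide (max (p.1.length : Int) (p.2.length : Int) ≤ pyMinSub3 b)) (b :: bs) = some b :=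
        List.find?_cons_of_pos (by simpa using hm)
      simp only [gbbmScan, if_pos hm, hfind]
    · simp only [gbbmScan, if_neg hm]
      rw [List.find?_cons_of_neg (by simpa using hm)]
      exact ih

-- ===== VERDICT (by name: the statement is the Claim_ definition above) =====
theorem get_batch_buckets_map_spec : Claim_equal_get_batch_buckets_map := by
  intro _pair_data buckets _hdom _hpre
  unfold Spec_get_batch_buckets_map get_batch_buckets_map get_batch_buckets_map_alt
  have hrecpw : ((buckets.foldl gbbmRecStep []).map (fun r => r.1)).Pairwise (· < ·) :=
    pvRecs_pairwise buckets [] (by simp)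
  have hstep : (fun (d : PySem.Dict (List Int) (List (List Int × List Int))) p => gbbmScan p buckets d)
      = (fun d p =>
          let m := max (p.1.length : Int) (p.2.length : Int)
          let lo := PySem.List.bisectLeft ((buckets.foldl gbbmRecStep []).map (fun r => r.1)) m
          match (buckets.foldl gbbmRecStep [])[lo]? with
          | some r => d.modify r.2 [] (fun l => l ++ [p])
          | none => d) := by
    funext d p
    simp only
    rw [pvBisect_find _ _ hrecpw]
    rw [pvFoldRec_find _ buckets [] (by simp)]
    rw [pvScan_eq_find]
    cases hf : buckets.find? (fun b => decide (max (p.1.length : Int) (p.2.length : Int) ≤ pyMinSub3 b)) with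
    | some b => simp
    | none => simp
  rw [hstep]
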